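-- pv_equiv track=rewrite | github.com/AvivYaniv/Natural-Language-Processing | nlp-hw3/Code/q1-4/most_frequent.py | most_frequent_train
-- ===== SOURCE A (Python) =====
-- def most_frequent_train(train_data):
--     """
--     Gets training data that includes tagged sentences.
--     Returns a dictionary that maps every word in the training set to its most frequent tag.
--     The dictionary should have a default value.
--     """
--     ### YOUR CODE HERE
--     tags_counts_for_each_word = {}
--     # Filling a dictionary from words and tag tags to their counters
--     # Going over the words and counting their tags appearances
--     for sentance in train_data:
--         for word, tag in sentance:
--             # If first time seeing word, adding it's tags count dictionary
--             if word not in tags_counts_for_each_word: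
--                 tags_counts_for_each_word[word] = {}
--             # Fetching word tags count dictionary
--             word_tags_count_dictionary = tags_counts_for_each_word[word]
--             # If tag not in word's tags dictionary, initializing the counter
--             if tag not in word_tags_count_dictionary:
--                 word_tags_count_dictionary[tag] = 0
--             # Incrementing word tag counter
--             word_tags_count_dictionary[tag] += 1
--
--     words_maximal_tags = {}
--     # Going over each word and finding it's maximal tag
--     for word in tags_counts_for_each_word:
--         # Fetching all word tags counts
--         word_tags_count_dictionary = tags_counts_for_each_word[word]
--
--         maximal_tag, maximal_tag_counter = '', 0
--         # Finding word tag with maximal tag counter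
--         for curent_tag, current_counter in word_tags_count_dictionary.items():
--             if current_counter > maximal_tag_counter:
--                 maximal_tag, maximal_tag_counter = curent_tag, current_counter
--
--         # Setting the maximal tag for current word
--         words_maximal_tags[word] = maximal_tag
--
--     return words_maximal_tags
-- ===== SOURCE B (Python) =====
-- def most_frequent_train(train_data):
--     """
--     Gets training data that includes tagged sentences.
--     Returns a dictionary that maps every word in the training set to its most frequent tag.
--     """
--     # One pass: flat (word, tag) pair counts.
--     counts = {}
--     for sentence in train_data:
--         for word, tag in sentence:
--             counts[(word, tag)] = counts.get((word, tag), 0) + 1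
--     # One reduction pass over the flat counts: keep the first tag reaching the max.
--     best = {}
--     best_count = {}
--     for (word, tag), c in counts.items():
--         if word not in best_count or c > best_count[word]:
--             best[word] = tag
--             best_count[word] = c
--     return best
-- ===== Notes on version B (the rewrite author's own statement) =====
-- stated objective: alternative
-- what changed: Replaces the nested dict-of-dicts tally plus per-word inner argmax loop by a flat (word,tag)->count dictionary built in one pass and a single reduction pass over its items that keeps, per word, the first tag whose count strictly exceeds the running best.
import Mathlib
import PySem

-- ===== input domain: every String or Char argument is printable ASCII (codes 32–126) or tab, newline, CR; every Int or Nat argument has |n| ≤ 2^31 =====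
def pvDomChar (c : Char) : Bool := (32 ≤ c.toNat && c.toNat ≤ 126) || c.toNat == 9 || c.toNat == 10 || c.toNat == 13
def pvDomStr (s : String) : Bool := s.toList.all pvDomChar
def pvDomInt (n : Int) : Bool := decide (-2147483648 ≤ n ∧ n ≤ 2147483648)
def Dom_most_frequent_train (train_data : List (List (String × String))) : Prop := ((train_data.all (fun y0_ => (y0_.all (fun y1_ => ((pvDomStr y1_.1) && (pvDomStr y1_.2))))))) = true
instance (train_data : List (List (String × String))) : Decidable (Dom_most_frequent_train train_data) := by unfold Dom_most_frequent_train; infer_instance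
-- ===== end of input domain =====

-- B replaces A's nested dict-of-dicts tally and per-word inner max loop by a flat
-- (word,tag)->count dictionary and one reduction pass over its items (objective: alternative).

-- ===== PORT A =====
-- literal port of A: nested word -> (tag -> count) dictionary, then per-word inner argmax loop
def most_frequent_train (train_data : List (List (String × String))) : List (String × String) :=
  let tags_counts_for_each_word : PySem.Dict String (PySem.Dict String Int) :=
    train_data.foldl (fun d sentance =>
      sentance.foldl (fun d wt =>
        -- if word not in tags_counts_for_each_word: tags_counts_for_each_word[word] = {}
        let d := if d.contains wt.1 then d else d.insert wt.1 PySem.Dict.empty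
        -- word_tags_count_dictionary = tags_counts_for_each_word[word]  (key is present)
        let inner := d.getD wt.1 PySem.Dict.empty
        -- if tag not in word_tags_count_dictionary: word_tags_count_dictionary[tag] = 0
        let inner := if inner.contains wt.2 then inner else inner.insert wt.2 0
        -- word_tags_count_dictionary[tag] += 1  (in-place mutation = re-insert)
        let inner := inner.insert wt.2 (inner.getD wt.2 0 + 1)
        d.insert wt.1 inner) d) PySem.Dict.empty
  let words_maximal_tags : PySem.Dict String String :=
    tags_counts_for_each_word.keys.foldl (fun res word =>
      let inner := tags_counts_for_each_word.getD word PySem.Dict.empty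
      let m := inner.items.foldl (fun m tc => if tc.2 > m.2 then tc else m) ("", (0 : Int))
      res.insert word m.1) PySem.Dict.empty
  words_maximal_tags.items

-- ===== PORT B =====
-- literal port of B: flat (word, tag) -> count dict, then one reduction pass over its items
def most_frequent_train_alt (train_data : List (List (String × String))) : List (String × String) :=
  let counts : PySem.Dict (String × String) Int :=
    train_data.foldl (fun c sentence =>
      sentence.foldl (fun c wt => c.insert wt (c.getD wt 0 + 1)) c) PySem.Dict.empty
  let bb : PySem.Dict String String × PySem.Dict String Int :=
    counts.items.foldl (fun bb pc =>
      -- if word not in best_count or c > best_count[word]: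
      if !bb.2.contains pc.1.1 || pc.2 > bb.2.getD pc.1.1 0 then
        (bb.1.insert pc.1.1 pc.1.2, bb.2.insert pc.1.1 pc.2)
      else bb) (PySem.Dict.empty, PySem.Dict.empty)
  bb.1.items

-- ===== PRECONDITION & SPEC =====
def Spec_most_frequent_train (train_data : List (List (String × String))) (out : List (String × String)) : Prop := out = most_frequent_train_alt train_data
instance (train_data : List (List (String × String))) (out : List (String × String)) : Decidable (Spec_most_frequent_train train_data out) := by unfold Spec_most_frequent_train; infer_instance

-- ===== CLAIM (what is proved, stated in full; the proofs are below) =====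
def Claim_equal_most_frequent_train : Prop := ∀ (train_data : List (List (String × String))), Dom_most_frequent_train train_data → Spec_most_frequent_train train_data (most_frequent_train train_data)

-- ===== LEMMAS AND PROOFS =====

-- A's phase-1 loop body, summarised as one Dict.modify
def pvStepM (d : PySem.Dict String (PySem.Dict String Int)) (wt : String × String) :
    PySem.Dict String (PySem.Dict String Int) :=
  d.modify wt.1 PySem.Dict.empty (fun inn => inn.modify wt.2 0 (· + 1))

-- B's phase-2 loop body
def pvStep2 (bb : PySem.Dict String String × PySem.Dict String Int)
    (pc : (String × String) × Int) : PySem.Dict String String × PySem.Dict String Int :=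
  if !bb.2.contains pc.1.1 || pc.2 > bb.2.getD pc.1.1 0 then
    (bb.1.insert pc.1.1 pc.1.2, bb.2.insert pc.1.1 pc.2)
  else bb

-- the per-word state of B's reduction, read off the two dicts as one Option
def pvOst (w : String) (bb : PySem.Dict String String × PySem.Dict String Int) :
    Option (String × Int) :=
  match bb.1.get? w, bb.2.get? w with
  | some t, some c => some (t, c)
  | _, _ => none

-- the two dicts of B's reduction always carry the same key set
def pvCons (bb : PySem.Dict String String × PySem.Dict String Int) : Prop :=
  ∀ w, (bb.1.get? w).isSome = (bb.2.get? w).isSome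

-- B's reduction step on the per-word Option state
def pvGstep (st : Option (String × Int)) (pc : (String × String) × Int) : Option (String × Int) :=
  match st with
  | none => some (pc.1.2, pc.2)
  | some s => some (if pc.2 > s.2 then (pc.1.2, pc.2) else s)

-- A's inner argmax fold
def pvAmax (l : List (String × Int)) : String × Int :=
  l.foldl (fun m tc => if tc.2 > m.2 then tc else m) ("", (0 : Int))

theorem pv_inner_eq (inner : PySem.Dict String Int) (t : String) :
    (if inner.contains t then inner else inner.insert t 0).insert t
      ((if inner.contains t then inner else inner.insert t 0).getD t 0 + 1)
    = inner.modify t 0 (· + 1) := by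
  by_cases h : inner.contains t
  · simp only [h, if_true, PySem.Dict.modify]
  · have h' : inner.contains t = false := by simpa using h
    simp only [h', Bool.false_eq_true, if_false, PySem.Dict.modify,
      PySem.Dict.getD_insert_self, PySem.Dict.insert_insert_self]
    rw [PySem.Dict.getD_of_not_contains (h := h')]

theorem pv_stepA_eq (d : PySem.Dict String (PySem.Dict String Int)) (wt : String × String) :
    (let d1 := if d.contains wt.1 then d else d.insert wt.1 PySem.Dict.empty
     let inner := d1.getD wt.1 PySem.Dict.empty
     let inner := if inner.contains wt.2 then inner else inner.insert wt.2 0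
     let inner := inner.insert wt.2 (inner.getD wt.2 0 + 1)
     d1.insert wt.1 inner) = pvStepM d wt := by
  dsimp only
  rw [pv_inner_eq]
  unfold pvStepM
  by_cases h : d.contains wt.1
  · simp only [h, if_true, PySem.Dict.modify]
  · have h' : d.contains wt.1 = false := by simpa using h
    simp only [h', Bool.false_eq_true, if_false, PySem.Dict.modify,
      PySem.Dict.getD_insert_self, PySem.Dict.insert_insert_self]
    rw [PySem.Dict.getD_of_not_contains (h := h')]

-- A's phase-1 dict as a single fold over the flattened token list
theorem pv_portA_d1 (train_data : List (List (String × String))) :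
    (train_data.foldl (fun d sentance =>
      sentance.foldl (fun d wt =>
        let d := if d.contains wt.1 then d else d.insert wt.1 PySem.Dict.empty
        let inner := d.getD wt.1 PySem.Dict.empty
        let inner := if inner.contains wt.2 then inner else inner.insert wt.2 0
        let inner := inner.insert wt.2 (inner.getD wt.2 0 + 1)
        d.insert wt.1 inner) d) PySem.Dict.empty)
    = (train_data.flatten).foldl pvStepM PySem.Dict.empty := by
  have hfun : (fun (d : PySem.Dict String (PySem.Dict String Int)) (wt : String × String) =>
      let d := if d.contains wt.1 then d else d.insert wt.1 PySem.Dict.empty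
      let inner := d.getD wt.1 PySem.Dict.empty
      let inner := if inner.contains wt.2 then inner else inner.insert wt.2 0
      let inner := inner.insert wt.2 (inner.getD wt.2 0 + 1)
      d.insert wt.1 inner) = pvStepM := by
    funext d wt; exact pv_stepA_eq d wt
  rw [hfun, List.foldl_flatten]

theorem pv_getD_foldM (ts : List (String × String)) (w : String) :
    ∀ d, (ts.foldl pvStepM d).getD w PySem.Dict.empty
      = ((ts.filter (fun p => p.1 == w)).map Prod.snd).foldl
          (fun inn t => inn.modify t 0 (· + 1)) (d.getD w PySem.Dict.empty) := by
  induction ts with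
  | nil => intro d; simp
  | cons p ts ih =>
    intro d
    simp only [List.foldl_cons, List.filter_cons]
    by_cases h : p.1 = w
    · simp only [beq_self_eq_true, if_true, List.map_cons, List.foldl_cons, ih,
        pvStepM, PySem.Dict.getD_modify_self, h]
    · have hb : (p.1 == w) = false := by simpa using h
      simp only [hb, Bool.false_eq_true, if_false]
      rw [ih, pvStepM, PySem.Dict.getD_modify_of_ne]
      exact fun e => h e.symm

theorem pv_keys_foldM (ts : List (String × String)) (d : PySem.Dict String (PySem.Dict String Int)) :
    (ts.foldl pvStepM d).keys = PySem.Set.update d.keys (ts.map Prod.fst) := by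
  have := PySem.Dict.keys_foldl_modify_key (l := ts) (key := Prod.fst)
    (f := fun _ wt => (fun inn => inn.modify wt.2 0 (· + 1))) (d0 := PySem.Dict.empty) (d := d)
  simpa [pvStepM] using this

-- what A returns, in closed form: first-seen words, each with its first strictly-maximal tag
theorem pv_portA_canon (train_data : List (List (String × String))) :
    most_frequent_train train_data
      = (PySem.Set.ofList ((train_data.flatten).map Prod.fst)).map
          (fun w => (w, (pvAmax ((PySem.Dict.counter
              (((train_data.flatten).filter (fun p => p.1 == w)).map Prod.snd)).items)).1)) := by
  unfold most_frequent_train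
  dsimp only
  rw [pv_portA_d1]
  set D := (train_data.flatten).foldl pvStepM PySem.Dict.empty with hD
  have hkeys : D.keys = PySem.Set.ofList ((train_data.flatten).map Prod.fst) := by
    rw [hD, pv_keys_foldM, PySem.Dict.keys_empty, PySem.Set.update_nil_left]
  have hgetD : ∀ w, D.getD w PySem.Dict.empty
      = PySem.Dict.counter (((train_data.flatten).filter (fun p => p.1 == w)).map Prod.snd) := by
    intro w
    rw [hD, pv_getD_foldM, PySem.Dict.getD_empty, PySem.Dict.counter_eq_foldl]
  have h1 : ∀ a ∈ D.keys, (PySem.Dict.empty : PySem.Dict String String).contains ((fun w => w) a) = false := by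
    intro a _; exact PySem.Dict.contains_empty _
  have h2 : (D.keys.map (fun w => w)).Nodup := by
    rw [List.map_id']; rw [hkeys]; exact PySem.Set.nodup_ofList _
  have hfresh := PySem.Dict.items_foldl_insert_fresh (l := D.keys) (k := fun w => w)
    (v := fun word => (((D.getD word PySem.Dict.empty).items).foldl
        (fun m tc => if tc.2 > m.2 then tc else m) ("", (0 : Int))).1)
    (d := PySem.Dict.empty) h1 h2
  simp only [show (PySem.Dict.empty : PySem.Dict String String).items = [] from rfl, List.nil_append] at hfresh
  rw [hfresh, hkeys]
  apply List.map_congr_left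
  intro w _
  rw [hgetD w]
  rfl

theorem pv_cons_step (bb : PySem.Dict String String × PySem.Dict String Int)
    (pc : (String × String) × Int) (h : pvCons bb) : pvCons (pvStep2 bb pc) := by
  intro w
  unfold pvStep2
  split
  · simp only [PySem.Dict.get?_insert]
    split
    · rfl
    · exact h w
  · exact h w

theorem pv_ost_step (w : String) (bb : PySem.Dict String String × PySem.Dict String Int)
    (pc : (String × String) × Int) (h : pvCons bb) :
    pvOst w (pvStep2 bb pc) = if pc.1.1 = w then pvGstep (pvOst w bb) pc else pvOst w bb := by
  by_cases hw : pc.1.1 = w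
  · subst hw
    cases hc : bb.2.get? pc.1.1 with
    | none =>
      have hcf : bb.2.contains pc.1.1 = false := by
        rw [PySem.Dict.contains_eq_isSome_get?, hc]; rfl
      have h1 : bb.1.get? pc.1.1 = none := by
        have := h pc.1.1; rw [hc] at this; simpa using this
      simp only [pvStep2, hcf, Bool.not_false, Bool.true_or, if_true, pvOst,
        PySem.Dict.get?_insert_self, pvGstep, h1]
    | some c0 =>
      have hct : bb.2.contains pc.1.1 = true := by
        rw [PySem.Dict.contains_eq_isSome_get?, hc]; rfl
      obtain ⟨t0, ht0⟩ : ∃ t0, bb.1.get? pc.1.1 = some t0 := by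
        have := h pc.1.1; rw [hc] at this
        cases he : bb.1.get? pc.1.1 with
        | none => rw [he] at this; simp at this
        | some t0 => exact ⟨t0, rfl⟩
      have hgd : bb.2.getD pc.1.1 0 = c0 := PySem.Dict.getD_of_get?_eq_some bb.2 0 hc
      simp only [pvStep2, hct, Bool.not_true, Bool.false_or, hgd, pvOst, ht0, hc, pvGstep]
      by_cases hgt : pc.2 > c0
      · simp [hgt, PySem.Dict.get?_insert_self]
      · simp [hgt, ht0, hc]
  · have hne : w ≠ pc.1.1 := fun e => hw e.symm
    simp only [pvStep2, if_neg hw]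
    split
    · simp only [pvOst, PySem.Dict.get?_insert_of_ne (hne := hne)]
    · rfl

theorem pv_cons_fold (l : List ((String × String) × Int)) :
    ∀ bb, pvCons bb → pvCons (l.foldl pvStep2 bb) := by
  induction l with
  | nil => intro bb h; exact h
  | cons p l ih => intro bb h; exact ih _ (pv_cons_step bb p h)

theorem pv_ost_fold (w : String) (l : List ((String × String) × Int)) :
    ∀ bb, pvCons bb →
      pvOst w (l.foldl pvStep2 bb) = (l.filter (fun pc => pc.1.1 == w)).foldl pvGstep (pvOst w bb) := by
  induction l with
  | nil => intro bb _; rfl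
  | cons p l ih =>
    intro bb h
    simp only [List.foldl_cons, List.filter_cons]
    rw [ih _ (pv_cons_step bb p h), pv_ost_step w bb p h]
    by_cases hw : p.1.1 = w
    · simp [hw]
    · have : (p.1.1 == w) = false := by simpa using hw
      simp [hw, this]

theorem pv_keys_fold2 (l : List ((String × String) × Int)) :
    ∀ bb, pvCons bb → (l.foldl pvStep2 bb).1.keys = PySem.Set.update bb.1.keys (l.map (fun pc => pc.1.1)) := by
  induction l with
  | nil => intro bb _; simp [PySem.Set.update_nil]
  | cons p l ih =>
    intro bb h
    simp only [List.foldl_cons, List.map_cons, PySem.Set.update_cons]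
    rw [ih _ (pv_cons_step bb p h)]
    congr 1
    unfold pvStep2
    by_cases hc : bb.2.contains p.1.1
    · have hc1 : bb.1.contains p.1.1 = true := by
        rw [PySem.Dict.contains_eq_isSome_get?, h p.1.1, ← PySem.Dict.contains_eq_isSome_get?]; exact hc
      have hmem : p.1.1 ∈ bb.1.keys := (PySem.Dict.contains_iff_mem_keys _ _).1 hc1
      split
      · simp [PySem.Dict.keys_insert_of_contains (h := hc1), PySem.Set.add_of_mem hmem]
      · simp [PySem.Set.add_of_mem hmem]
    · have hcf : bb.2.contains p.1.1 = false := by simpa using hc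
      have hc1 : bb.1.contains p.1.1 = false := by
        rw [PySem.Dict.contains_eq_isSome_get?, h p.1.1, ← PySem.Dict.contains_eq_isSome_get?]; exact hcf
      have hnmem : p.1.1 ∉ bb.1.keys := fun m =>
        by rw [(PySem.Dict.contains_iff_mem_keys _ _).2 m] at hc1; simp at hc1
      simp only [hcf, Bool.not_false, Bool.true_or, if_true]
      simp [PySem.Dict.keys_insert_of_not_contains (h := hc1), PySem.Set.add_of_not_mem hnmem]

theorem pv_get?_of_ost (w : String) (bb : PySem.Dict String String × PySem.Dict String Int)
    (h : pvCons bb) : bb.1.get? w = (pvOst w bb).map Prod.fst := by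
  unfold pvOst
  cases hc : bb.2.get? w with
  | none =>
    have := h w; rw [hc] at this
    cases he : bb.1.get? w with
    | none => simp
    | some t => rw [he] at this; simp at this
  | some c =>
    have := h w; rw [hc] at this
    cases he : bb.1.get? w with
    | none => rw [he] at this; simp at this
    | some t => simp

theorem pv_ofList_map_ofList {α β : Type} [BEq α] [LawfulBEq α] [BEq β] [LawfulBEq β] (l : List α) (f : α → β) :
    PySem.Set.ofList ((PySem.Set.ofList l).map f) = PySem.Set.ofList (l.map f) := by
  induction l using List.reverseRecOn with
  | nil => rfl
  | append_singleton l x ih =>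
    rw [PySem.Set.ofList_append_singleton, List.map_append, List.map_singleton,
      PySem.Set.ofList_append_singleton]
    by_cases hx : x ∈ PySem.Set.ofList l
    · have hfx : f x ∈ PySem.Set.ofList (l.map f) := by
        rw [PySem.Set.mem_ofList]
        exact List.mem_map_of_mem ((PySem.Set.mem_ofList _ _).1 hx)
      rw [PySem.Set.add_of_mem hx, ih, PySem.Set.add_of_mem hfx]
    · rw [PySem.Set.add_of_not_mem hx, List.map_append, List.map_singleton,
        PySem.Set.ofList_append_singleton, ih]

-- distinct (word, tag) pairs of one word, in order, are that word's distinct tags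
theorem pv_filter_ofList_pair (w : String) (ts : List (String × String)) :
    (PySem.Set.ofList ts).filter (fun p => p.1 == w)
      = (PySem.Set.ofList ((ts.filter (fun p => p.1 == w)).map Prod.snd)).map (fun t => (w, t)) := by
  induction ts using List.reverseRecOn with
  | nil => rfl
  | append_singleton ts p ih =>
    rw [PySem.Set.ofList_append_singleton]
    by_cases hw : p.1 = w
    · have hwb : (p.1 == w) = true := by simpa using hw
      have h1 : List.filter (fun q => q.1 == w) (ts ++ [p]) = List.filter (fun q => q.1 == w) ts ++ [p] := by
        simp [List.filter_append, List.filter, hwb]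
      rw [h1, List.map_append, List.map_singleton, PySem.Set.ofList_append_singleton]
      by_cases hp : p ∈ PySem.Set.ofList ts
      · have hsnd : p.2 ∈ PySem.Set.ofList ((ts.filter (fun q => q.1 == w)).map Prod.snd) := by
          rw [PySem.Set.mem_ofList]
          exact List.mem_map_of_mem (List.mem_filter.2 ⟨(PySem.Set.mem_ofList _ _).1 hp, hwb⟩)
        rw [PySem.Set.add_of_mem hp, PySem.Set.add_of_mem hsnd, ih]
      · have hsnd : p.2 ∉ PySem.Set.ofList ((ts.filter (fun q => q.1 == w)).map Prod.snd) := by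
          rw [PySem.Set.mem_ofList]
          intro hm
          obtain ⟨q, hq, he⟩ := List.mem_map.1 hm
          obtain ⟨hqts, hqw⟩ := List.mem_filter.1 hq
          have hq1 : q.1 = w := by simpa using hqw
          have hqp : q = p := by
            obtain ⟨q1, q2⟩ := q; obtain ⟨p1, p2⟩ := p
            simp only [Prod.mk.injEq]
            exact ⟨hq1.trans hw.symm, he⟩
          exact hp ((PySem.Set.mem_ofList _ _).2 (hqp ▸ hqts))
        rw [PySem.Set.add_of_not_mem hp, PySem.Set.add_of_not_mem hsnd,
          List.filter_append, List.map_append, ih]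
        have h2 : List.filter (fun q => q.1 == w) [p] = [p] := by simp [List.filter, hwb]
        rw [h2, List.map_singleton]
        have h3 : (w, p.2) = p := by obtain ⟨p1, p2⟩ := p; simp_all
        rw [h3]
    · have hwb : (p.1 == w) = false := by simpa using hw
      have h1 : List.filter (fun q => q.1 == w) (ts ++ [p]) = List.filter (fun q => q.1 == w) ts := by
        simp [List.filter_append, List.filter, hwb]
      rw [h1]
      by_cases hp : p ∈ PySem.Set.ofList ts
      · rw [PySem.Set.add_of_mem hp, ih]
      · rw [PySem.Set.add_of_not_mem hp, List.filter_append]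
        have h2 : List.filter (fun q => q.1 == w) [p] = [] := by simp [List.filter, hwb]
        rw [h2, List.append_nil, ih]

theorem pv_count_pair (w t : String) (ts : List (String × String)) :
    ts.count (w, t) = ((ts.filter (fun p => p.1 == w)).map Prod.snd).count t := by
  induction ts with
  | nil => rfl
  | cons p ts ih =>
    obtain ⟨p1, p2⟩ := p
    by_cases hw : p1 = w
    · subst hw
      simp [List.count_cons, ih]
    · have hwb : ((p1, p2).1 == w) = false := by simpa using hw
      simp [hwb, hw, ih, Prod.ext_iff]

theorem pv_g_map (w : String) (l : List (String × Int)) :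
    ∀ s : String × Int,
      (l.map (fun tc => ((w, tc.1), tc.2))).foldl pvGstep (some s)
        = some (l.foldl (fun m tc => if tc.2 > m.2 then tc else m) s) := by
  induction l with
  | nil => intro s; rfl
  | cons tc l ih =>
    intro s
    simp only [List.map_cons, List.foldl_cons, pvGstep, ih]

-- per word: B's reduction over the flat counter items yields exactly A's inner argmax
theorem pv_pointwise (ts : List (String × String)) (w : String)
    (hw : w ∈ PySem.Set.ofList (ts.map Prod.fst)) :
    ((((PySem.Set.ofList ts).map (fun k => (k, (ts.count k : Int)))).filter
        (fun pc => pc.1.1 == w)).foldl pvGstep none)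
      = some (pvAmax ((PySem.Dict.counter ((ts.filter (fun p => p.1 == w)).map Prod.snd)).items)) := by
  have hfl : (((PySem.Set.ofList ts).map (fun k => (k, (ts.count k : Int)))).filter
        (fun pc => pc.1.1 == w))
      = ((PySem.Set.ofList ts).filter (fun p => p.1 == w)).map (fun k => (k, (ts.count k : Int))) := by
    rw [List.filter_map]; rfl
  rw [hfl, pv_filter_ofList_pair, List.map_map]
  set tags := (ts.filter (fun p => p.1 == w)).map Prod.snd with htags
  have hmap : (PySem.Set.ofList tags).map ((fun k => (k, (ts.count k : Int))) ∘ (fun t => (w, t)))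
      = ((PySem.Set.ofList tags).map (fun t => (t, (tags.count t : Int)))).map
          (fun tc => ((w, tc.1), tc.2)) := by
    rw [List.map_map]
    apply List.map_congr_left
    intro t _
    simp only [Function.comp]
    rw [pv_count_pair w t ts]
  rw [hmap]
  have hne : tags ≠ [] := by
    rw [PySem.Set.mem_ofList] at hw
    obtain ⟨p, hp, hp1⟩ := List.mem_map.1 hw
    have : p.2 ∈ tags := by
      rw [htags]
      exact List.mem_map_of_mem (List.mem_filter.2 ⟨hp, by simpa using hp1⟩)
    exact List.ne_nil_of_mem this
  have hTne : PySem.Set.ofList tags ≠ [] := by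
    intro he
    obtain ⟨t, ht⟩ := List.exists_mem_of_ne_nil tags hne
    have : t ∈ PySem.Set.ofList tags := (PySem.Set.mem_ofList _ _).2 ht
    rw [he] at this
    exact List.not_mem_nil this
  rw [PySem.Dict.items_counter]
  cases hT : PySem.Set.ofList tags with
  | nil => exact absurd hT hTne
  | cons t0 T' =>
    have ht0 : t0 ∈ tags := by
      rw [PySem.Set.mem_ofList] at *
      rw [← PySem.Set.mem_ofList, hT]; exact List.mem_cons_self
    have hc0 : 0 < tags.count t0 := List.count_pos_iff.mpr ht0
    simp only [List.map_cons, List.foldl_cons]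
    rw [show pvGstep none ((w, t0), (tags.count t0 : Int)) = some (t0, (tags.count t0 : Int)) from rfl,
      pv_g_map]
    unfold pvAmax
    simp only [List.foldl_cons]
    have hpos : ((0 : Int) < (tags.count t0 : Int)) := by exact_mod_cast hc0
    rw [if_pos (show ((tags.count t0 : Int) > 0) from hpos)]

-- what B returns, via its two reduction dicts
theorem pv_final (train_data : List (List (String × String))) :
    most_frequent_train train_data = most_frequent_train_alt train_data := by
  unfold most_frequent_train_alt
  dsimp only
  rw [← List.foldl_flatten, PySem.Dict.foldl_insert_getD_add_one_eq_counter]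
  set ts := train_data.flatten with hts
  rw [PySem.Dict.items_counter]
  have hstep : (fun (bb : PySem.Dict String String × PySem.Dict String Int)
      (pc : (String × String) × Int) =>
      if !bb.2.contains pc.1.1 || pc.2 > bb.2.getD pc.1.1 0 then
        (bb.1.insert pc.1.1 pc.1.2, bb.2.insert pc.1.1 pc.2)
      else bb) = pvStep2 := rfl
  rw [hstep]
  set itemsB := (PySem.Set.ofList ts).map (fun k => (k, (ts.count k : Int))) with hitems
  set bb := itemsB.foldl pvStep2 (PySem.Dict.empty, PySem.Dict.empty) with hbb
  have hcons0 : pvCons (PySem.Dict.empty, PySem.Dict.empty) := fun w => rfl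
  have hconsF : pvCons bb := pv_cons_fold itemsB _ hcons0
  have hkeysB : bb.1.keys = PySem.Set.ofList (ts.map Prod.fst) := by
    rw [hbb, pv_keys_fold2 itemsB _ hcons0]
    have : (PySem.Dict.empty : PySem.Dict String String).keys = [] := rfl
    rw [this, PySem.Set.update_nil_left, hitems, List.map_map]
    have : ((fun (pc : (String × String) × Int) => pc.1.1) ∘ (fun k => (k, (ts.count k : Int))))
        = Prod.fst := rfl
    rw [this, pv_ofList_map_ofList]
  have hnodupB : bb.1.keys.Nodup := by rw [hkeysB]; exact PySem.Set.nodup_ofList _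
  have hitemsB : bb.1.items = bb.1.keys.map (fun w => (w, bb.1.getD w "")) :=
    PySem.Dict.items_eq_map_keys bb.1 hnodupB ""
  rw [pv_portA_canon, hitemsB, hkeysB]
  apply List.map_congr_left
  intro w hw
  have hget : bb.1.get? w = (pvOst w bb).map Prod.fst := pv_get?_of_ost w bb hconsF
  have host : pvOst w bb = (itemsB.filter (fun pc => pc.1.1 == w)).foldl pvGstep none := by
    rw [hbb, pv_ost_fold w itemsB _ hcons0]; rfl
  rw [pv_pointwise ts w hw] at host
  have hgetsome : bb.1.get? w
      = some ((pvAmax ((PySem.Dict.counter ((ts.filter (fun p => p.1 == w)).map Prod.snd)).items)).1) := by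
    rw [hget, host]; rfl
  have hgd : bb.1.getD w ""
      = (pvAmax ((PySem.Dict.counter ((ts.filter (fun p => p.1 == w)).map Prod.snd)).items)).1 :=
    PySem.Dict.getD_of_get?_eq_some bb.1 "" hgetsome
  rw [hgd]

-- ===== VERDICT (by name: the statement is the Claim_ definition above) =====
theorem most_frequent_train_spec : Claim_equal_most_frequent_train := by
  intro train_data _
  unfold Spec_most_frequent_train
  exact pv_final train_data
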